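-- pv_equiv track=rewrite | github.com/QuanDeFi/caxen | repo-analysis/src/common/inventory.py | is_generated_path
-- ===== SOURCE A (Python) =====
-- def is_generated_path(relative_path: str) -> bool:
--     generated_patterns = (
--         "/generated/",
--         "/gen/",
--         "/dist/",
--         "/target/",
--         "/vendor/",
--     )
--     if any(pattern in f"/{relative_path}/" for pattern in generated_patterns):
--         return True
--     return relative_path.endswith((".pb.rs", "_pb2.py", "_grpc.py"))
-- ===== SOURCE B (Python) =====
-- _GENERATED_DIRS = frozenset({"generated", "gen", "dist", "target", "vendor"})
--
--
-- def is_generated_path(relative_path: str) -> bool: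
--     if any(part in _GENERATED_DIRS for part in relative_path.split("/")):
--         return True
--     return relative_path.endswith((".pb.rs", "_pb2.py", "_grpc.py"))
-- ===== Notes on version B (the rewrite author's own statement) =====
-- stated objective: idiomatic
-- what changed: Replaces the slash-wrapped substring scan over a synthesized string by splitting the path into components and testing each component for membership in a frozenset of generated-directory names; the endswith suffix check is unchanged.
import Mathlib
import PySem

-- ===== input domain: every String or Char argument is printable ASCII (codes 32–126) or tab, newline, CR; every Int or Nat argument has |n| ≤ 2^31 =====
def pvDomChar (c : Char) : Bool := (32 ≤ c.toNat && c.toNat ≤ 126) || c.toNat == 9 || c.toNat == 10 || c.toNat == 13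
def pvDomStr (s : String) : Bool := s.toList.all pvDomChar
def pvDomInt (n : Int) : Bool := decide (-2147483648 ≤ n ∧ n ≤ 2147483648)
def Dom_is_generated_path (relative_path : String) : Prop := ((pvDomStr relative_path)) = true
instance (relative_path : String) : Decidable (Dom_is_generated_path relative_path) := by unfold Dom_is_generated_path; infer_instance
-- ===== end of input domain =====

-- B replaces A's substring scan over the slash-wrapped string by split-on-'/' plus
-- set membership of the components (idiomatic tokenize-then-membership); suffix check unchanged.

-- ===== PORT A =====
def is_generated_path (relative_path : String) : Bool :=
  -- any(pattern in f"/{relative_path}/" …): the wrapped string built on code points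
  if (["/generated/", "/gen/", "/dist/", "/target/", "/vendor/"].any
        (fun pattern =>
          PySem.Chars.isIn pattern.toList ('/' :: (relative_path.toList ++ ['/'])))) then
    true
  else
    -- endswith with a tuple = any of the three suffixes
    PySem.Str.endswith relative_path ".pb.rs" ||
    PySem.Str.endswith relative_path "_pb2.py" ||
    PySem.Str.endswith relative_path "_grpc.py"

-- ===== PORT B =====
-- _GENERATED_DIRS (a frozenset of distinct literals; membership = list membership)
def pvGenDirs : List (List Char) :=
  ["generated".toList, "gen".toList, "dist".toList, "target".toList, "vendor".toList]

def is_generated_path_alt (relative_path : String) : Bool :=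
  if ((relative_path.toList.splitOn '/').any (fun part => pvGenDirs.contains part)) then
    true
  else
    PySem.Str.endswith relative_path ".pb.rs" ||
    PySem.Str.endswith relative_path "_pb2.py" ||
    PySem.Str.endswith relative_path "_grpc.py"

-- ===== PRECONDITION & SPEC =====
def Spec_is_generated_path (relative_path : String) (out : Bool) : Prop := out = is_generated_path_alt relative_path
instance (relative_path : String) (out : Bool) : Decidable (Spec_is_generated_path relative_path out) := by unfold Spec_is_generated_path; infer_instance

-- ===== CLAIM (what is proved, stated in full; the proofs are below) =====
def Claim_equal_is_generated_path : Prop := ∀ (relative_path : String), Dom_is_generated_path relative_path → Spec_is_generated_path relative_path (is_generated_path relative_path)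

-- ===== LEMMAS AND PROOFS =====

theorem pv_splitOnP_free {α : Type} (p : α → Bool) :
    ∀ (l : List α) (x : List α), x ∈ List.splitOnP p l → ∀ c ∈ x, p c = false := by
  intro l
  induction l with
  | nil => intro x hx c hc; simp [List.splitOnP_nil] at hx; subst hx; simp at hc
  | cons a t ih =>
    intro x hx c hc
    rw [List.splitOnP_cons] at hx
    by_cases hpa : p a = true
    · simp [hpa] at hx
      rcases hx with hx | hx
      · subst hx; simp at hc
      · exact ih x hx c hc
    · simp [hpa] at hx
      rcases hne : List.splitOnP p t with _ | ⟨h0, r⟩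
      · exact absurd hne (List.splitOnP_ne_nil p t)
      · rw [hne] at hx
        simp [List.modifyHead] at hx
        rcases hx with hx | hx
        · subst hx
          rcases List.mem_cons.1 hc with rfl | hc2
          · simpa using hpa
          · exact ih h0 (by rw [hne]; exact List.mem_cons_self) c hc2
        · exact ih x (by rw [hne]; exact List.mem_cons_of_mem _ hx) c hc

theorem pv_splitOn_free (l : List Char) (x : List Char) (hx : x ∈ l.splitOn '/') : '/' ∉ x := by
  intro hm
  have := pv_splitOnP_free (fun c => c == '/') l x (by simpa [List.splitOn] using hx) '/' hm
  simp at this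

-- core: '/w/' is an infix of the slash-glued parts iff w is one of the parts
theorem pv_prefix_slash_eq (w : List Char) (hw : '/' ∉ w) :
    ∀ (p r : List Char), '/' ∉ p → w ++ ['/'] <+: p ++ '/' :: r → w = p := by
  induction w with
  | nil =>
    intro p r hp h
    cases p with
    | nil => rfl
    | cons b p' =>
      rcases h with ⟨t, ht⟩
      simp at ht
      exact absurd (ht.1 ▸ List.mem_cons_self) hp
  | cons a w' ih =>
    intro p r hp h
    cases p with
    | nil =>
      rcases h with ⟨t, ht⟩
      simp at ht
      exact absurd (ht.1 ▸ List.mem_cons_self) hw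
    | cons b p' =>
      rcases h with ⟨t, ht⟩
      simp at ht
      obtain ⟨hab, ht'⟩ := ht
      have hw' : '/' ∉ w' := fun hm => hw (List.mem_cons_of_mem _ hm)
      have hp' : '/' ∉ p' := fun hm => hp (List.mem_cons_of_mem _ hm)
      have := ih hw' p' r hp' ⟨t, by simpa using ht'⟩
      simp [hab, this]

theorem pv_glue_iff (w : List Char) (hw : '/' ∉ w) :
    ∀ (parts : List (List Char)), parts ≠ [] → (∀ p ∈ parts, '/' ∉ p) →
      (('/' :: (w ++ ['/'])) <:+: ('/' :: (List.intercalate ['/'] parts ++ ['/'])) ↔ w ∈ parts) := by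
  intro parts
  induction parts with
  | nil => intro h; exact absurd rfl h
  | cons p ps ih =>
    intro _ hfree
    have hp : '/' ∉ p := hfree p List.mem_cons_self
    cases ps with
    | nil =>
      simp only [List.intercalate, List.intersperse, List.flatten,
        List.mem_singleton]
      constructor
      · rintro ⟨pre, suf, h⟩
        have hcw : List.count '/' w = 0 := List.count_eq_zero.mpr hw
        have hcp : List.count '/' p = 0 := List.count_eq_zero.mpr hp
        have hcount := congrArg (List.count '/') h
        simp [List.count_append, hcw, hcp] at hcount
        have hpre : List.count '/' pre = 0 := by omega
        have hprenil : pre = [] := by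
          cases pre with
          | nil => rfl
          | cons x pre' =>
            have hx : x = '/' := by
              have := congrArg (fun l => l.head?) h
              simpa using this
            exact absurd (List.count_eq_zero.mp hpre) (by simp [hx])
        subst hprenil
        simp at h
        have : w ++ ['/'] <+: p ++ '/' :: [] := ⟨suf, by simpa using h⟩
        exact pv_prefix_slash_eq w hw p [] hp this
      · rintro rfl
        simp
    | cons q qs =>
      have hfree' : ∀ x ∈ q :: qs, '/' ∉ x := fun x hx => hfree x (List.mem_cons_of_mem _ hx)
      have ihq := ih (by simp) hfree'
      have hglue : List.intercalate ['/'] (p :: q :: qs)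
          = p ++ '/' :: List.intercalate ['/'] (q :: qs) := by
        simp [List.intercalate, List.intersperse]
      rw [hglue]
      constructor
      · rintro ⟨pre, suf, h⟩
        cases pre with
        | nil =>
          simp at h
          have : w ++ ['/'] <+: p ++ '/' :: (List.intercalate ['/'] (q :: qs) ++ ['/']) :=
            ⟨suf, by simpa using h⟩
          exact (List.mem_cons).2 (Or.inl (pv_prefix_slash_eq w hw p _ hp this))
        | cons x pre' =>
          have hx : x = '/' := by
            have := congrArg (fun l => l.head?) h
            simpa using this
          subst hx
          have h' : pre' ++ ('/' :: (w ++ ['/'])) ++ suf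
              = p ++ ('/' :: (List.intercalate ['/'] (q :: qs) ++ ['/'])) := by
            have := congrArg List.tail h
            simpa using this
          by_cases hlen : p.length ≤ pre'.length
          · have hpre1 : pre' <+: p ++ ('/' :: (List.intercalate ['/'] (q :: qs) ++ ['/'])) :=
              ⟨('/' :: (w ++ ['/'])) ++ suf, by simpa [List.append_assoc] using h'⟩
            have hpp : p <+: pre' :=
              List.prefix_of_prefix_length_le (List.prefix_append _ _) hpre1 hlen
            obtain ⟨m, hm⟩ := hpp
            subst hm
            have h2 := h'
            simp only [List.append_assoc] at h2
            have h'' : m ++ ('/' :: (w ++ ['/']) ++ suf)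
                = '/' :: (List.intercalate ['/'] (q :: qs) ++ ['/']) :=
              List.append_cancel_left h2
            cases m with
            | nil =>
              have : ('/' :: (w ++ ['/'])) <+: '/' :: (List.intercalate ['/'] (q :: qs) ++ ['/']) :=
                ⟨suf, by simpa using h''⟩
              exact List.mem_cons_of_mem _ (ihq.mp this.isInfix)
            | cons y m' =>
              have hy : y = '/' := by
                have := congrArg (fun l => l.head?) h''
                simpa using this
              subst hy
              have h''' : m' ++ ('/' :: (w ++ ['/']) ++ suf)
                  = List.intercalate ['/'] (q :: qs) ++ ['/'] := by
                have := congrArg List.tail h''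
                simpa using this
              refine List.mem_cons_of_mem _ (ihq.mp ⟨'/' :: m', suf, ?_⟩)
              simp only [List.cons_append, List.nil_append,
                List.append_assoc] at h''' ⊢
              rw [h''']
          · rw [Nat.not_le] at hlen
            have hpre1 : pre' <+: p ++ ('/' :: (List.intercalate ['/'] (q :: qs) ++ ['/'])) :=
              ⟨('/' :: (w ++ ['/'])) ++ suf, by simpa [List.append_assoc] using h'⟩
            have hpp : pre' <+: p :=
              List.prefix_of_prefix_length_le hpre1 (List.prefix_append _ _)
                (by simpa using Nat.le_of_lt hlen)
            obtain ⟨m, hm⟩ := hpp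
            cases m with
            | nil =>
              exfalso
              rw [List.append_nil] at hm
              subst hm
              simp at hlen
            | cons a m' =>
              exfalso
              have ha : a ≠ '/' := fun h0 => hp (by rw [← hm, h0]; simp)
              have h2 := h'
              rw [← hm] at h2
              simp only [List.append_assoc] at h2
              have h3 := List.append_cancel_left h2
              have := congrArg (fun l => l.head?) h3
              simp at this
              exact ha this.symm
      · intro hmem
        rcases (List.mem_cons).1 hmem with rfl | hmem'
        · refine ⟨[], List.intercalate ['/'] (q :: qs) ++ ['/'], ?_⟩
          simp
        · rcases ihq.mpr hmem' with ⟨pre, suf, hps⟩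
          cases pre with
          | nil =>
            refine ⟨'/' :: p, suf, ?_⟩
            simp only [List.cons_append, List.nil_append,
              List.append_assoc] at hps ⊢
            rw [hps]
          | cons y pre' =>
            have hy : y = '/' := by
              have := congrArg (fun l => l.head?) hps
              simpa using this
            subst hy
            have htail : pre' ++ ('/' :: (w ++ ['/'])) ++ suf
                = List.intercalate ['/'] (q :: qs) ++ ['/'] := by
              have := congrArg List.tail hps
              simpa using this
            refine ⟨'/' :: p ++ '/' :: pre', suf, ?_⟩
            simp only [List.cons_append, List.nil_append,
              List.append_assoc] at htail ⊢
            rw [htail]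

-- specialisation: '/w/' infix of '/l/' iff w is a '/'-component of l
theorem pv_infix_wrap_iff (w l : List Char) (hw : '/' ∉ w) :
    (('/' :: (w ++ ['/'])) <:+: ('/' :: (l ++ ['/'])) ↔ w ∈ l.splitOn '/') := by
  have h := pv_glue_iff w hw (l.splitOn '/')
    (by simpa [List.splitOn] using List.splitOnP_ne_nil (fun c => c == '/') l)
    (fun p hp => pv_splitOn_free l p hp)
  rwa [List.intercalate_splitOn] at h

-- per-directory Bool form, with the wrapped pattern written as a string literal
theorem pv_isIn_eq_contains (w l : List Char) (hw : '/' ∉ w) :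
    PySem.Chars.isIn ('/' :: (w ++ ['/'])) ('/' :: (l ++ ['/'])) = (l.splitOn '/').contains w := by
  apply Bool.coe_iff_coe.mp
  rw [PySem.Chars.isIn_iff_infix, List.contains_iff_mem]
  exact pv_infix_wrap_iff w l hw

-- ===== VERDICT (by name: the statement is the Claim_ definition above) =====
theorem is_generated_path_spec : Claim_equal_is_generated_path := by
  intro relative_path _
  unfold Spec_is_generated_path is_generated_path is_generated_path_alt
  set l := relative_path.toList with hl
  have e1 : ("/generated/".toList : List Char) = '/' :: ("generated".toList ++ ['/']) := by decide
  have e2 : ("/gen/".toList : List Char) = '/' :: ("gen".toList ++ ['/']) := by decide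
  have e3 : ("/dist/".toList : List Char) = '/' :: ("dist".toList ++ ['/']) := by decide
  have e4 : ("/target/".toList : List Char) = '/' :: ("target".toList ++ ['/']) := by decide
  have e5 : ("/vendor/".toList : List Char) = '/' :: ("vendor".toList ++ ['/']) := by decide
  have hcond : (["/generated/", "/gen/", "/dist/", "/target/", "/vendor/"].any
        (fun pattern => PySem.Chars.isIn pattern.toList ('/' :: (l ++ ['/']))))
      = ((l.splitOn '/').any (fun part => pvGenDirs.contains part)) := by
    apply Bool.coe_iff_coe.mp
    simp only [List.any_cons, List.any_nil, Bool.or_eq_true, Bool.or_false]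
    rw [e1, e2, e3, e4, e5,
      pv_isIn_eq_contains _ l (by decide), pv_isIn_eq_contains _ l (by decide),
      pv_isIn_eq_contains _ l (by decide), pv_isIn_eq_contains _ l (by decide),
      pv_isIn_eq_contains _ l (by decide)]
    simp only [List.any_eq_true, List.contains_iff_mem, pvGenDirs, List.mem_cons,
      List.not_mem_nil, or_false]
    constructor
    · rintro (h | h | h | h | h)
      exacts [⟨_, h, Or.inl rfl⟩, ⟨_, h, Or.inr (Or.inl rfl)⟩,
        ⟨_, h, Or.inr (Or.inr (Or.inl rfl))⟩, ⟨_, h, Or.inr (Or.inr (Or.inr (Or.inl rfl)))⟩,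
        ⟨_, h, Or.inr (Or.inr (Or.inr (Or.inr rfl)))⟩]
    · rintro ⟨x, hx, rfl | rfl | rfl | rfl | rfl⟩
      exacts [Or.inl hx, Or.inr (Or.inl hx), Or.inr (Or.inr (Or.inl hx)),
        Or.inr (Or.inr (Or.inr (Or.inl hx))), Or.inr (Or.inr (Or.inr (Or.inr hx)))]
  rw [hcond]
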